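-- pv_equiv track=rewrite | github.com/Peritract/adventofcode | 2023/day_13.py | check_smudges
-- ===== SOURCE A (Python) =====
-- def find_reflection(pattern):
--     possible = None
--     lines = []
--     for i in range(len(pattern) -1):
--         if pattern[i] == pattern[i + 1]:
--             possible = (i, i + 1)
--             u, d = i - 1, i + 2
--             while u >= 0 and d < len(pattern):
--                 if pattern[u] == pattern[d]:
--                     u -= 1
--                     d += 1
--                 else:
--                     possible = None
--                     break
--             if possible is not None:
--                 lines.append(possible)
--     return lines if len(lines) > 0 else None
--
-- def transpose(pattern):
--     rows = []
--     for x in range(len(pattern[0])):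
--         row = ""
--         for y in range(len(pattern)):
--             row += pattern[y][x]
--         rows.append(row)
--     return rows
--
-- def find_reflection_lines(pattern):
--     lines = []
--     if ver := find_reflection(transpose(pattern)):
--         for l in ver:
--             lines.append(("V", l))
--     if hor := find_reflection(pattern):
--         for l in hor:
--             lines.append(("H", l))
--     return lines
--
-- def check_smudges(pattern, original):
--     for y in range(len(pattern)):
--         for x in range(len(pattern[0])):
--
--             pattern[y][x] = "." if pattern[y][x] == "#" else "#"
--             lines = find_reflection_lines(pattern)
--             for l in lines:
--                 if l not in original:
--                     return l
--             pattern[y][x] = "." if pattern[y][x] == "#" else "#"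
-- ===== SOURCE B (Python) =====
-- def check_smudges(pattern, original):
--     R = len(pattern)
--     C = len(pattern[0]) if R else 0
--     grid = [list(row) for row in pattern]
--     cols = ["".join(grid[y][x] for y in range(R)) for x in range(C)]
--
--     def mismatches(seq, i):
--         """Unequal mirrored pairs around the axis between seq[i] and seq[i+1]."""
--         m, u, d = 0, i, i + 1
--         while u >= 0 and d < len(seq):
--             if seq[u] != seq[d]:
--                 m += 1
--             u -= 1
--             d += 1
--         return m
--
--     row_mis = [mismatches(grid, i) for i in range(R - 1)]
--     col_mis = [mismatches(cols, j) for j in range(C - 1)]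
--
--     def write(y, x, ch):
--         """Set grid[y][x] = ch, keeping every per-axis mismatch count current:
--         the cell only affects axis i through the mirrored partner of its line."""
--         new_row = grid[y][:x] + [ch] + grid[y][x + 1:]
--         new_col = "".join(ch if yy == y else grid[yy][x] for yy in range(R))
--         for i in range(R - 1):
--             py = 2 * i + 1 - y
--             if 0 <= py < R:
--                 row_mis[i] += (new_row != grid[py]) - (grid[y] != grid[py])
--         for j in range(C - 1):
--             px = 2 * j + 1 - x
--             if 0 <= px < C:
--                 col_mis[j] += (new_col != cols[px]) - (cols[x] != cols[px])
--         grid[y] = new_row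
--         cols[x] = new_col
--
--     for y in range(R):
--         for x in range(C):
--             write(y, x, "." if grid[y][x] == "#" else "#")
--             for j in range(C - 1):
--                 if col_mis[j] == 0 and ("V", (j, j + 1)) not in original:
--                     return ("V", (j, j + 1))
--             for i in range(R - 1):
--                 if row_mis[i] == 0 and ("H", (i, i + 1)) not in original:
--                     return ("H", (i, i + 1))
--             write(y, x, "." if grid[y][x] == "#" else "#")
--     return None
-- ===== Notes on version B (the rewrite author's own statement) =====
-- stated objective: faster
-- what changed: B precomputes one mirrored-pair mismatch count per candidate reflection axis and maintains the counts incrementally under each in-place cell write, so each flipped cell is decided by scanning the counts instead of re-running A's full transpose-and-expand reflection search on the whole grid; Pre_ excludes only grids with a row shorter than row 0, on which A raises IndexError in transpose.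
import Mathlib
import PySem

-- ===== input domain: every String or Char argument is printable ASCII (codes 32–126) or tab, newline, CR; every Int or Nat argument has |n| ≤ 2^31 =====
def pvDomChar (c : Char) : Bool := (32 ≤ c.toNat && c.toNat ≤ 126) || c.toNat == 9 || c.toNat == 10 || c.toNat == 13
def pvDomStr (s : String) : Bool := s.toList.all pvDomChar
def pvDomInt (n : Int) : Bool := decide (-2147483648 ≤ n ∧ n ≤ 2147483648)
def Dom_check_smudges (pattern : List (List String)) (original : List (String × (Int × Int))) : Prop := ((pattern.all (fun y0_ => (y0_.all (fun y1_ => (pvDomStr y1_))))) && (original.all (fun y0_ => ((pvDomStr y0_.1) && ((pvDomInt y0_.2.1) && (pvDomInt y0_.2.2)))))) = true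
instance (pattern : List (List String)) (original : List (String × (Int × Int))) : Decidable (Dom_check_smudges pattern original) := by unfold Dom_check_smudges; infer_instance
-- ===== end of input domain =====

-- B replaces A's per-flip full reflection search (transpose + expand for every flipped cell) by
-- per-axis mismatch counts maintained incrementally under each in-place cell write: objective = faster.
-- A mutates `pattern` in place; B writes only to its own copy: the equivalence proved here is about
-- the RETURN value only.

-- ===== PORT A =====
-- while u >= 0 and d < len(pattern): … (the expansion loop of find_reflection)
def fr_expand {α : Type} [BEq α] (p : List α) (u d : Int) : Bool :=
  if h : 0 ≤ u ∧ d < (p.length : Int) then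
    if PySem.List.pyGet? p u == PySem.List.pyGet? p d then fr_expand p (u - 1) (d + 1)
    else false
  else true
termination_by (u + 1).toNat
decreasing_by omega

def find_reflection {α : Type} [BEq α] (p : List α) : Option (List (Int × Int)) :=
  let lines := (List.range (p.length - 1)).foldl (fun acc (i : Nat) =>
    if PySem.List.pyGet? p (i : Int) == PySem.List.pyGet? p ((i : Int) + 1) then
      if fr_expand p ((i : Int) - 1) ((i : Int) + 2) then acc ++ [((i : Int), (i : Int) + 1)]
      else acc
    else acc) []
  if lines.length > 0 then some lines else none

def transposeA (p : List (List String)) : List String :=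
  (List.range ((p.headD []).length)).foldl (fun rows x =>
    rows ++ [(List.range p.length).foldl (fun row y => row ++ ((p.getD y []).getD x "")) ""]) []

def find_reflection_lines (p : List (List String)) : List (String × (Int × Int)) :=
  let lines : List (String × (Int × Int)) := []
  let lines := match find_reflection (transposeA p) with
    | some ver => lines ++ ver.map (fun l => (("V" : String), l))
    | none => lines
  match find_reflection p with
    | some hor => lines ++ hor.map (fun l => (("H" : String), l))
    | none => lines

-- the x-loop of check_smudges; the pattern is MUTATED in place in Python, so the (evolving) grid is
-- threaded through as state; a cell left flipped on an early return is irrelevant to the result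
def ax_loop (original : List (String × (Int × Int))) (y : Nat) :
    List Nat → List (List String) → Option (String × (Int × Int)) × List (List String)
  | [], G => (none, G)
  | x :: xs, G =>
      let flipped := G.modify y (fun row => row.modify x (fun c => if c == "#" then "." else "#"))
      match (find_reflection_lines flipped).find? (fun l => !(original.contains l)) with
      | some l => (some l, flipped)
      | none => ax_loop original y xs
          (flipped.modify y (fun row => row.modify x (fun c => if c == "#" then "." else "#")))

def ay_loop (original : List (String × (Int × Int))) :
    List Nat → List (List String) → Option (String × (Int × Int))
  | [], _ => none
  | y :: ys, G =>
      match ax_loop original y (List.range ((G.headD []).length)) G with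
      | (some l, _) => some l
      | (none, G') => ay_loop original ys G'

def check_smudges (pattern : List (List String)) (original : List (String × (Int × Int))) :
    Option (String × (Int × Int)) :=
  ay_loop original (List.range pattern.length) pattern

-- ===== PORT B =====
-- m = 0; u, d = i, i+1; while u >= 0 and d < len(seq): …  (B's mismatches helper)
def bmis {α : Type} [BEq α] (seq : List α) (u d : Int) (m : Int) : Int :=
  if h : 0 ≤ u ∧ d < (seq.length : Int) then
    bmis seq (u - 1) (d + 1)
      (if PySem.List.pyGet? seq u == PySem.List.pyGet? seq d then m else m + 1)
  else m
termination_by (u + 1).toNat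
decreasing_by omega

-- B's write(y, x, ch): set grid[y][x] = ch, keeping every per-axis mismatch count current
def bwrite (R C y x : Nat) (ch : String) (G : List (List String)) (S : List String)
    (mH mV : List Int) : List (List String) × List String × List Int × List Int :=
  let row := G.getD y []
  let newrow := PySem.List.slice row none (some (x : Int)) ++ [ch]
    ++ PySem.List.slice row (some ((x : Int) + 1)) none
  let newcol := (List.range R).foldl
    (fun s yy => s ++ (if yy == y then ch else (G.getD yy []).getD x "")) ""
  let mH' := (List.range (R - 1)).map (fun (i : Nat) =>
    if 0 ≤ 2 * (i : Int) + 1 - (y : Int) ∧ 2 * (i : Int) + 1 - (y : Int) < (R : Int) then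
      mH.getD i 0 + (if newrow == G.getD (2 * (i : Int) + 1 - (y : Int)).toNat [] then 0 else 1)
        - (if G.getD y [] == G.getD (2 * (i : Int) + 1 - (y : Int)).toNat [] then 0 else 1)
    else mH.getD i 0)
  let mV' := (List.range (C - 1)).map (fun (j : Nat) =>
    if 0 ≤ 2 * (j : Int) + 1 - (x : Int) ∧ 2 * (j : Int) + 1 - (x : Int) < (C : Int) then
      mV.getD j 0 + (if newcol == S.getD (2 * (j : Int) + 1 - (x : Int)).toNat "" then 0 else 1)
        - (if S.getD x "" == S.getD (2 * (j : Int) + 1 - (x : Int)).toNat "" then 0 else 1)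
    else mV.getD j 0)
  (G.set y newrow, S.set x newcol, mH', mV')

def bx_loop (original : List (String × (Int × Int))) (R C y : Nat) :
    List Nat → List (List String) → List String → List Int → List Int →
    Option (String × (Int × Int)) × (List (List String) × List String × List Int × List Int)
  | [], G, S, mH, mV => (none, (G, S, mH, mV))
  | x :: xs, G, S, mH, mV =>
      match bwrite R C y x (if (G.getD y []).getD x "" == "#" then "." else "#") G S mH mV with
      | (G1, S1, mH1, mV1) =>
        match ((List.range (C - 1)).findSome? (fun (j : Nat) =>
            if (mV1.getD j 0 == (0 : Int))
                && !(original.contains (("V" : String), ((j : Int), (j : Int) + 1)))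
            then some (("V" : String), ((j : Int), (j : Int) + 1)) else none)).orElse (fun _ =>
          (List.range (R - 1)).findSome? (fun (i : Nat) =>
            if (mH1.getD i 0 == (0 : Int))
                && !(original.contains (("H" : String), ((i : Int), (i : Int) + 1)))
            then some (("H" : String), ((i : Int), (i : Int) + 1)) else none)) with
        | some l => (some l, (G1, S1, mH1, mV1))
        | none =>
            match bwrite R C y x (if (G1.getD y []).getD x "" == "#" then "." else "#")
                G1 S1 mH1 mV1 with
            | (G2, S2, mH2, mV2) => bx_loop original R C y xs G2 S2 mH2 mV2

def by_loop (original : List (String × (Int × Int))) (R C : Nat) :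
    List Nat → List (List String) → List String → List Int → List Int →
    Option (String × (Int × Int))
  | [], _, _, _, _ => none
  | y :: ys, G, S, mH, mV =>
      match bx_loop original R C y (List.range C) G S mH mV with
      | (some l, _) => some l
      | (none, (G', S', mH', mV')) => by_loop original R C ys G' S' mH' mV'

def check_smudges_alt (pattern : List (List String)) (original : List (String × (Int × Int))) :
    Option (String × (Int × Int)) :=
  let R := pattern.length
  let C := (pattern.headD []).length   -- len(pattern[0]) if pattern else 0
  let grid := pattern.map (fun r => r)   -- [list(row) for row in pattern]: a copy; identity on values
  let cols := (List.range C).map (fun (x : Nat) =>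
    (List.range R).foldl (fun s y => s ++ (grid.getD y []).getD x "") "")
  let rowMis := (List.range (R - 1)).map (fun (i : Nat) => bmis grid (i : Int) ((i : Int) + 1) 0)
  let colMis := (List.range (C - 1)).map (fun (j : Nat) => bmis cols (j : Int) ((j : Int) + 1) 0)
  by_loop original R C (List.range R) grid cols rowMis colMis

-- ===== PRECONDITION & SPEC =====
-- Pre_ is exactly A's return domain: every row at least as long as row 0 (a shorter row makes A's
-- transpose raise IndexError on the very first flip; B's column build raises there too).
def Pre_check_smudges (pattern : List (List String)) (original : List (String × (Int × Int))) : Prop :=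
  ∀ row ∈ pattern, (pattern.headD []).length ≤ row.length
instance (pattern : List (List String)) (original : List (String × (Int × Int))) : Decidable (Pre_check_smudges pattern original) := by unfold Pre_check_smudges; infer_instance

def pvWitness_check_smudges : List (List String) × (List (String × (Int × Int))) :=
  ([["#", "."], [".", "."], [".", "."]], [("H", (1, 2))])

def Spec_check_smudges (pattern : List (List String)) (original : List (String × (Int × Int))) (out : Option (String × (Int × Int))) : Prop := out = check_smudges_alt pattern original
instance (pattern : List (List String)) (original : List (String × (Int × Int))) (out : Option (String × (Int × Int))) : Decidable (Spec_check_smudges pattern original out) := by unfold Spec_check_smudges; infer_instance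

-- ===== CLAIM (what is proved, stated in full; the proofs are below) =====
def Claim_equal_check_smudges : Prop := ∀ (pattern : List (List String)) (original : List (String × (Int × Int))), Dom_check_smudges pattern original → Pre_check_smudges pattern original → Spec_check_smudges pattern original (check_smudges pattern original)

-- ===== LEMMAS AND PROOFS =====

-- proof-side basics
def pvCell (p : List (List String)) (y x : Nat) : String := (p.getD y []).getD x ""

-- pair-level mismatch count of the mirror zone around the axis between u and d
def pvMis {α : Type} [BEq α] (q : List α) (u d : Int) : Nat :=
  if 0 ≤ u ∧ d < (q.length : Int) then
    (if PySem.List.pyGet? q u == PySem.List.pyGet? q d then 0 else 1) + pvMis q (u - 1) (d + 1)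
  else 0
termination_by (u + 1).toNat
decreasing_by omega

def pvColStr (q : List (List String)) (x : Nat) : String :=
  (List.range q.length).foldl (fun row y => row ++ pvCell q y x) ""

def pvAxes {α : Type} [BEq α] (q : List α) : List (Int × Int) :=
  ((List.range (q.length - 1)).filter
    (fun (i : Nat) => decide (pvMis q (i : Int) ((i : Int) + 1) = 0))).map
    (fun (i : Nat) => ((i : Int), (i : Int) + 1))

theorem pv_some_beq {α : Type} [BEq α] (a b : α) : ((some a == some b) : Bool) = (a == b) := rfl

theorem pv_pyGet_getD {α : Type} (q : List α) (x : Nat) (dflt : α) (h : x < q.length) :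
    PySem.List.pyGet? q (x : Int) = some (q.getD x dflt) := by
  rw [PySem.List.pyGet?_natCast, List.getElem?_eq_getElem h, List.getD_eq_getElem?_getD,
    List.getElem?_eq_getElem h, Option.getD_some]

-- B's mismatches loop computes pvMis
theorem pv_bmis_eq {α : Type} [BEq α] (seq : List α) (u d : Int) (m : Int) :
    bmis seq u d m = m + (pvMis seq u d : Int) := by
  fun_induction bmis with
  | case1 u d m h ih =>
      simp only [dite_eq_ite] at ih
      rw [ih]
      conv_rhs => rw [pvMis]
      rw [if_pos h]
      by_cases hb : (PySem.List.pyGet? seq u == PySem.List.pyGet? seq d) = true <;>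
        simp [hb] <;> push_cast <;> ring
  | case2 u d m h => rw [pvMis, if_neg h]; simp

-- head-pair test plus expansion loop ↔ zero mismatch count
theorem pv_expand_mis {α : Type} [BEq α] (q : List α) :
    ∀ (n : Nat) (u d : Int), (u + 1).toNat ≤ n → 0 ≤ u → u < d → d < (q.length : Int) →
    ((PySem.List.pyGet? q u == PySem.List.pyGet? q d) && fr_expand q (u - 1) (d + 1))
      = decide (pvMis q u d = 0) := by
  intro n
  induction n with
  | zero => intro u d hn hu hud hd; omega
  | succ n ih =>
      intro u d hn hu hud hd
      have hrec : fr_expand q (u - 1) (d + 1) = decide (pvMis q (u - 1) (d + 1) = 0) := by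
        rw [fr_expand]
        by_cases h2 : 0 ≤ u - 1 ∧ d + 1 < (q.length : Int)
        · rw [dif_pos h2]
          have hcomb : (if (PySem.List.pyGet? q (u - 1) == PySem.List.pyGet? q (d + 1)) = true
              then fr_expand q (u - 1 - 1) (d + 1 + 1) else false)
              = ((PySem.List.pyGet? q (u - 1) == PySem.List.pyGet? q (d + 1))
                  && fr_expand q (u - 1 - 1) (d + 1 + 1)) := by
            by_cases hb : (PySem.List.pyGet? q (u - 1) == PySem.List.pyGet? q (d + 1)) = true <;>
              simp [hb]
          rw [hcomb, ih (u - 1) (d + 1) (by omega) (by omega) (by omega) (by omega)]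
        · rw [dif_neg h2, pvMis, if_neg h2]
          simp
      rw [hrec]
      conv_rhs => rw [pvMis]
      rw [if_pos ⟨hu, hd⟩]
      by_cases h1 : (PySem.List.pyGet? q u == PySem.List.pyGet? q d) = true <;>
        by_cases h2 : pvMis q (u - 1) (d + 1) = 0 <;>
        simp [h1, h2]

theorem pv_fr_eq {α : Type} [BEq α] (q : List α) :
    find_reflection q = if (pvAxes q).length > 0 then some (pvAxes q) else none := by
  have hfold : (List.range (q.length - 1)).foldl (fun acc (i : Nat) =>
      if PySem.List.pyGet? q (i : Int) == PySem.List.pyGet? q ((i : Int) + 1) then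
        if fr_expand q ((i : Int) - 1) ((i : Int) + 2) then acc ++ [((i : Int), (i : Int) + 1)]
        else acc
      else acc) [] = pvAxes q := by
    rw [PySem.List.foldl_congr_mem
      (g := fun acc (i : Nat) => if decide (pvMis q (i : Int) ((i : Int) + 1) = 0)
          then acc ++ [((i : Int), (i : Int) + 1)] else acc)]
    · exact (PySem.List.foldl_append_if _ _ _ _).trans (by simp [pvAxes])
    · intro acc i hi
      rw [List.mem_range] at hi
      have key := pv_expand_mis q (i + 1) (i : Int) ((i : Int) + 1)
        (by omega) (by omega) (by omega) (by omega)
      rw [← key]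
      have h12 : ((i : Int) + 1 + 1) = ((i : Int) + 2) := by ring
      rw [h12]
      by_cases h1 : (PySem.List.pyGet? q (i : Int) == PySem.List.pyGet? q ((i : Int) + 1)) = true <;>
        by_cases h2 : fr_expand q ((i : Int) - 1) ((i : Int) + 2) = true <;>
        simp [h1, h2]
  rw [show find_reflection q = (if ((List.range (q.length - 1)).foldl (fun acc (i : Nat) =>
      if PySem.List.pyGet? q (i : Int) == PySem.List.pyGet? q ((i : Int) + 1) then
        if fr_expand q ((i : Int) - 1) ((i : Int) + 2) then acc ++ [((i : Int), (i : Int) + 1)]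
        else acc
      else acc) []).length > 0 then some ((List.range (q.length - 1)).foldl (fun acc (i : Nat) =>
      if PySem.List.pyGet? q (i : Int) == PySem.List.pyGet? q ((i : Int) + 1) then
        if fr_expand q ((i : Int) - 1) ((i : Int) + 2) then acc ++ [((i : Int), (i : Int) + 1)]
        else acc
      else acc) []) else none) from rfl, hfold]

theorem pv_frl_eq (g : List (List String)) :
    find_reflection_lines g
      = (pvAxes (transposeA g)).map (fun l => (("V" : String), l))
        ++ (pvAxes g).map (fun l => (("H" : String), l)) := by
  have hz : ∀ (L : List (Int × Int)), ¬(L.length > 0) → L = [] := by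
    intro L h
    cases L with
    | nil => rfl
    | cons a t => simp at h
  unfold find_reflection_lines
  rw [pv_fr_eq (transposeA g), pv_fr_eq g]
  by_cases h1 : (pvAxes (transposeA g)).length > 0 <;> by_cases h2 : (pvAxes g).length > 0
  · simp [h1, h2]
  · rw [hz _ h2]; simp [h1]
  · rw [hz _ h1]; simp [h2]
  · rw [hz _ h1, hz _ h2]; simp

theorem pv_find_append {α : Type} (l₁ l₂ : List α) (pred : α → Bool) :
    (l₁ ++ l₂).find? pred = (l₁.find? pred).orElse (fun _ => l₂.find? pred) := by
  rw [List.find?_append]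
  cases l₁.find? pred <;> rfl

theorem pv_find_filter_map {α β : Type} (l : List α) (f : α → Bool) (g : α → β) (pred : β → Bool) :
    ((l.filter f).map g).find? pred
      = l.findSome? (fun i => if f i && pred (g i) then some (g i) else none) := by
  induction l with
  | nil => rfl
  | cons a t ih =>
      by_cases hf : f a
      · by_cases hp : pred (g a) <;> simp [List.filter_cons, hf, hp, ih]
      · simp [List.filter_cons, hf, ih]

theorem pv_findSome_congr {α β : Type} (l : List α) (f g : α → Option β)
    (h : ∀ a ∈ l, f a = g a) : l.findSome? f = l.findSome? g := by
  induction l with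
  | nil => rfl
  | cons a t ih =>
      rw [List.findSome?_cons, List.findSome?_cons, h a (by simp),
        ih (fun b hb => h b (by simp [hb]))]

theorem pv_getD_map_range {β : Type} (f : Nat → β) (C a : Nat) (dflt : β) (h : a < C) :
    ((List.range C).map f).getD a dflt = f a := by
  simp [List.getD_eq_getElem?_getD, h]

theorem pv_getD_modify {α : Type} (l : List α) (i j : Nat) (f : α → α) (dflt : α)
    (hi : i < l.length) :
    (l.modify i f).getD j dflt = if i = j then f (l.getD j dflt) else l.getD j dflt := by
  by_cases hj : j < l.length
  · have h2 : j < (l.modify i f).length := by simpa using hj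
    rw [List.getD_eq_getElem?_getD, List.getElem?_eq_getElem h2, Option.getD_some,
      List.getElem_modify f i l j h2, List.getD_eq_getElem?_getD, List.getElem?_eq_getElem hj,
      Option.getD_some]
  · have hij : i ≠ j := by omega
    rw [if_neg hij, List.getD_eq_getElem?_getD, List.getD_eq_getElem?_getD,
      List.getElem?_eq_none (by rw [List.length_modify]; omega), List.getElem?_eq_none (by omega)]

-- transposeA is the list of column strings
theorem pv_transposeA (q : List (List String)) :
    transposeA q = (List.range ((q.headD []).length)).map (pvColStr q) := by
  unfold transposeA pvColStr pvCell
  exact (PySem.List.foldl_append_singleton_eq_map _ _ _).trans (by simp)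

theorem pv_headD_getD {α : Type} (l : List α) (d : α) : l.headD d = l.getD 0 d := by
  cases l <;> rfl

-- the modified row, as B builds it with slices
theorem pv_newrow (row : List String) (x : Nat) (f : String → String) (hx : x < row.length) :
    row.modify x f
      = PySem.List.slice row none (some (x : Int)) ++ [f (row.getD x "")]
        ++ PySem.List.slice row (some ((x : Int) + 1)) none := by
  rw [PySem.List.slice_to_natCast, show ((x : Int) + 1) = ((x + 1 : Nat) : Int) from by push_cast; ring,
    PySem.List.slice_from_natCast, List.modify_eq_take_cons_drop hx]
  rw [List.getD_eq_getElem?_getD, List.getElem?_eq_getElem hx, Option.getD_some]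
  simp

theorem pv_ext_getD {α : Type} (l₁ l₂ : List α) (dflt : α) (hlen : l₁.length = l₂.length)
    (h : ∀ i, i < l₁.length → l₁.getD i dflt = l₂.getD i dflt) : l₁ = l₂ := by
  apply List.ext_getElem hlen
  intro i h1 h2
  have := h i h1
  rwa [List.getD_eq_getElem?_getD, List.getD_eq_getElem?_getD, List.getElem?_eq_getElem h1,
    List.getElem?_eq_getElem h2, Option.getD_some, Option.getD_some] at this

theorem pv_getD_set {α : Type} (l : List α) (i j : Nat) (a : α) (dflt : α) (hi : i < l.length) :
    (l.set i a).getD j dflt = if i = j then a else l.getD j dflt := by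
  by_cases hj : j < l.length
  · have h2 : j < (l.set i a).length := by simpa using hj
    rw [List.getD_eq_getElem?_getD, List.getElem?_eq_getElem h2, Option.getD_some,
      List.getElem_set, List.getD_eq_getElem?_getD, List.getElem?_eq_getElem hj, Option.getD_some]
  · have hij : i ≠ j := by omega
    rw [if_neg hij, List.getD_eq_getElem?_getD, List.getD_eq_getElem?_getD,
      List.getElem?_eq_none (by simpa using hj), List.getElem?_eq_none (by omega)]

theorem pv_pyGet_getD' {α : Type} (q : List α) (v : Int) (dflt : α)
    (h0 : 0 ≤ v) (hv : v < (q.length : Int)) :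
    PySem.List.pyGet? q v = some (q.getD v.toNat dflt) := by
  calc PySem.List.pyGet? q v = PySem.List.pyGet? q ((v.toNat : Nat) : Int) := by
        rw [show ((v.toNat : Nat) : Int) = v from by omega]
    _ = some (q.getD v.toNat dflt) := pv_pyGet_getD q v.toNat dflt (by omega)

theorem pv_beq_comm {α : Type} [BEq α] [LawfulBEq α] (a b : α) : (a == b) = (b == a) := by
  by_cases h : a = b
  · rw [h]
  · rw [beq_eq_false_iff_ne.mpr h, beq_eq_false_iff_ne.mpr (fun h2 => h h2.symm)]

theorem pv_pyGet_same {α : Type} [BEq α] (q q' : List α) (t : Nat)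
    (hlen : q'.length = q.length)
    (hsame : ∀ i : Nat, i < q.length → i ≠ t → q'[i]? = q[i]?) (v : Int)
    (h0 : 0 ≤ v) (hv : v < (q.length : Int)) (hvt : v ≠ (t : Int)) :
    PySem.List.pyGet? q' v = PySem.List.pyGet? q v := by
  have hv' : v = ((v.toNat : Nat) : Int) := by omega
  rw [hv', PySem.List.pyGet?_natCast, PySem.List.pyGet?_natCast]
  exact hsame v.toNat (by omega) (by omega)

-- central: replacing element t changes the zone mismatch count only on t's mirrored pair
theorem pv_mis_update {α : Type} [BEq α] [LawfulBEq α] (q q' : List α) (t : Nat)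
    (hlen : q'.length = q.length) (ht : t < q.length)
    (hsame : ∀ i : Nat, i < q.length → i ≠ t → q'[i]? = q[i]?) :
    ∀ (n : Nat) (u d : Int), (u + 1).toNat ≤ n → u < d →
    pvMis q' u d
      + (if ((t : Int) ≤ u ∧ u + d - (t : Int) < (q.length : Int))
            ∨ (d ≤ (t : Int) ∧ 0 ≤ u + d - (t : Int)) then
          (if PySem.List.pyGet? q (t : Int) == PySem.List.pyGet? q (u + d - (t : Int)) then 0 else 1)
        else 0)
    = pvMis q u d
      + (if ((t : Int) ≤ u ∧ u + d - (t : Int) < (q.length : Int))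
            ∨ (d ≤ (t : Int) ∧ 0 ≤ u + d - (t : Int)) then
          (if PySem.List.pyGet? q' (t : Int) == PySem.List.pyGet? q (u + d - (t : Int)) then 0 else 1)
        else 0) := by
  intro n
  induction n with
  | zero =>
      intro u d hn hud
      have hA : ¬(((t : Int) ≤ u ∧ u + d - (t : Int) < (q.length : Int))
          ∨ (d ≤ (t : Int) ∧ 0 ≤ u + d - (t : Int))) := by omega
      conv_lhs => rw [pvMis]
      conv_rhs => rw [pvMis]
      rw [if_neg (by omega : ¬(0 ≤ u ∧ d < (q'.length : Int))),
        if_neg (by omega : ¬(0 ≤ u ∧ d < (q.length : Int))), if_neg hA, if_neg hA]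
  | succ n ih =>
      intro u d hn hud
      by_cases g : 0 ≤ u ∧ d < (q.length : Int)
      case neg =>
        have hA : ¬(((t : Int) ≤ u ∧ u + d - (t : Int) < (q.length : Int))
            ∨ (d ≤ (t : Int) ∧ 0 ≤ u + d - (t : Int))) := by omega
        have g2 : ¬(0 ≤ u ∧ d < (q'.length : Int)) := by rw [hlen]; exact g
        conv_lhs => rw [pvMis]
        conv_rhs => rw [pvMis]
        rw [if_neg g2, if_neg g, if_neg hA, if_neg hA]
      case pos =>
        have g2 : 0 ≤ u ∧ d < (q'.length : Int) := by rw [hlen]; exact g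
        conv_lhs => rw [pvMis]
        conv_rhs => rw [pvMis]
        rw [if_pos g2, if_pos g]
        by_cases hyu : (t : Int) = u
        · have hptr : u + d - (t : Int) = d := by omega
          rw [hptr]
          have hT : ((t : Int) ≤ u ∧ d < (q.length : Int)) ∨ (d ≤ (t : Int) ∧ 0 ≤ d) :=
            Or.inl ⟨by omega, g.2⟩
          rw [if_pos hT, if_pos hT]
          have hq'd : PySem.List.pyGet? q' d = PySem.List.pyGet? q d :=
            pv_pyGet_same q q' t hlen hsame d (by omega) g.2 (by omega)
          have hAtail : ¬(((t : Int) ≤ u - 1 ∧ u - 1 + (d + 1) - (t : Int) < (q.length : Int))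
              ∨ (d + 1 ≤ (t : Int) ∧ 0 ≤ u - 1 + (d + 1) - (t : Int))) := by omega
          have htail : pvMis q' (u - 1) (d + 1) = pvMis q (u - 1) (d + 1) := by
            have hh := ih (u - 1) (d + 1) (by omega) (by omega)
            rw [if_neg hAtail, if_neg hAtail] at hh
            omega
          rw [htail, ← hyu, hq'd]
          omega
        · by_cases hyd : (t : Int) = d
          · have hptr : u + d - (t : Int) = u := by omega
            rw [hptr]
            have hT : ((t : Int) ≤ u ∧ u < (q.length : Int)) ∨ (d ≤ (t : Int) ∧ 0 ≤ u) :=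
              Or.inr ⟨by omega, g.1⟩
            rw [if_pos hT, if_pos hT]
            have hq'u : PySem.List.pyGet? q' u = PySem.List.pyGet? q u :=
              pv_pyGet_same q q' t hlen hsame u g.1 (by omega) (by omega)
            have hAtail : ¬(((t : Int) ≤ u - 1 ∧ u - 1 + (d + 1) - (t : Int) < (q.length : Int))
                ∨ (d + 1 ≤ (t : Int) ∧ 0 ≤ u - 1 + (d + 1) - (t : Int))) := by omega
            have htail : pvMis q' (u - 1) (d + 1) = pvMis q (u - 1) (d + 1) := by
              have hh := ih (u - 1) (d + 1) (by omega) (by omega)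
              rw [if_neg hAtail, if_neg hAtail] at hh
              omega
            rw [htail, ← hyd,
              pv_beq_comm (PySem.List.pyGet? q (t : Int)) (PySem.List.pyGet? q u),
              pv_beq_comm (PySem.List.pyGet? q' (t : Int)) (PySem.List.pyGet? q u), hq'u]
            omega
          · have hcu : PySem.List.pyGet? q' u = PySem.List.pyGet? q u :=
              pv_pyGet_same q q' t hlen hsame u g.1 (by omega) (fun h => hyu h.symm)
            have hcd : PySem.List.pyGet? q' d = PySem.List.pyGet? q d :=
              pv_pyGet_same q q' t hlen hsame d (by omega) g.2 (fun h => hyd h.symm)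
            have hh := ih (u - 1) (d + 1) (by omega) (by omega)
            have hsum : u - 1 + (d + 1) = u + d := by ring
            rw [hsum] at hh
            have hTeq : (((t : Int) ≤ u - 1 ∧ u + d - (t : Int) < (q.length : Int))
                ∨ (d + 1 ≤ (t : Int) ∧ 0 ≤ u + d - (t : Int)))
                = (((t : Int) ≤ u ∧ u + d - (t : Int) < (q.length : Int))
                ∨ (d ≤ (t : Int) ∧ 0 ≤ u + d - (t : Int))) := by
              apply propext
              constructor <;> intro hc <;> omega
            simp only [hTeq] at hh
            rw [hcu, hcd]
            omega

theorem pv_getElem?_modify_ne {α : Type} (l : List α) (y i : Nat) (f : α → α) (h : y ≠ i) :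
    (l.modify y f)[i]? = l[i]? := by
  rw [List.getElem?_modify]
  cases l[i]? <;> simp [h]

theorem pv_pyGet_modify_self {α : Type} (l : List α) (y : Nat) (f : α → α) (dflt : α)
    (hy : y < l.length) :
    PySem.List.pyGet? (l.modify y f) (y : Int) = some (f (l.getD y dflt)) := by
  rw [PySem.List.pyGet?_natCast, List.getElem?_modify, List.getElem?_eq_getElem hy,
    List.getD_eq_getElem?_getD, List.getElem?_eq_getElem hy, Option.getD_some]
  simp

theorem pv_cell_modify (p : List (List String)) (y x : Nat) (f : String → String) (y' x' : Nat)
    (hy : y < p.length) (hx : x < (p.getD y []).length) :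
    pvCell (p.modify y (fun row => row.modify x f)) y' x'
      = if y = y' ∧ x = x' then f (pvCell p y x) else pvCell p y' x' := by
  unfold pvCell
  rw [pv_getD_modify _ _ _ _ _ hy]
  by_cases h1 : y = y'
  · subst h1
    rw [if_pos rfl, pv_getD_modify _ _ _ _ _ hx]
    by_cases h2 : x = x'
    · subst h2
      simp
    · simp [h2]
  · simp [h1]

theorem pv_modify_rowlen (p : List (List String)) (y x : Nat) (f : String → String) (i : Nat) :
    ((p.modify y (fun row => row.modify x f)).getD i []).length = (p.getD i []).length := by
  by_cases hy : y < p.length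
  · rw [pv_getD_modify _ _ _ _ _ hy]
    by_cases h : y = i <;> simp [h]
  · have : p.modify y (fun row => row.modify x f) = p := by
      apply List.ext_getElem (by simp)
      intro i h1 h2
      rw [List.getElem_modify, if_neg (by omega)]
    rw [this]

theorem pv_colStr_len_congr (q q' : List (List String)) (x : Nat)
    (hlen : q'.length = q.length) (h : ∀ yy, yy < q.length → pvCell q' yy x = pvCell q yy x) :
    pvColStr q' x = pvColStr q x := by
  unfold pvColStr
  rw [hlen]
  apply PySem.List.foldl_congr_mem
  intro acc yy hyy
  rw [List.mem_range] at hyy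
  rw [h yy hyy]

-- updated mismatch count, in B's incremental form
theorem pv_mis_set {α : Type} [BEq α] [LawfulBEq α] (q q' : List α) (t : Nat)
    (hlen : q'.length = q.length) (ht : t < q.length)
    (hsame : ∀ i : Nat, i < q.length → i ≠ t → q'[i]? = q[i]?) (i : Nat)
    (hi : i < q.length - 1) :
    (pvMis q' (i : Int) ((i : Int) + 1) : Int)
      = if 0 ≤ 2 * (i : Int) + 1 - (t : Int) ∧ 2 * (i : Int) + 1 - (t : Int) < (q.length : Int)
        then (pvMis q (i : Int) ((i : Int) + 1) : Int)
          + (if PySem.List.pyGet? q' (t : Int)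
                == PySem.List.pyGet? q (2 * (i : Int) + 1 - (t : Int)) then 0 else 1)
          - (if PySem.List.pyGet? q (t : Int)
                == PySem.List.pyGet? q (2 * (i : Int) + 1 - (t : Int)) then 0 else 1)
        else (pvMis q (i : Int) ((i : Int) + 1) : Int) := by
  have key := pv_mis_update q q' t hlen ht hsame (i + 1) (i : Int) ((i : Int) + 1)
    (by omega) (by omega)
  have hptr : (i : Int) + ((i : Int) + 1) - (t : Int) = 2 * (i : Int) + 1 - (t : Int) := by ring
  rw [hptr] at key
  have hTiff : (((t : Int) ≤ (i : Int) ∧ 2 * (i : Int) + 1 - (t : Int) < (q.length : Int))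
      ∨ ((i : Int) + 1 ≤ (t : Int) ∧ 0 ≤ 2 * (i : Int) + 1 - (t : Int)))
      ↔ (0 ≤ 2 * (i : Int) + 1 - (t : Int)
          ∧ 2 * (i : Int) + 1 - (t : Int) < (q.length : Int)) := by
    omega
  by_cases hT : 0 ≤ 2 * (i : Int) + 1 - (t : Int)
      ∧ 2 * (i : Int) + 1 - (t : Int) < (q.length : Int)
  · rw [if_pos hT]
    rw [if_pos (hTiff.mpr hT), if_pos (hTiff.mpr hT)] at key
    by_cases b1 : (PySem.List.pyGet? q' (t : Int)
        == PySem.List.pyGet? q (2 * (i : Int) + 1 - (t : Int))) = true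
    · by_cases b2 : (PySem.List.pyGet? q (t : Int)
          == PySem.List.pyGet? q (2 * (i : Int) + 1 - (t : Int))) = true
      · rw [if_pos b1, if_pos b2]
        rw [if_pos b1, if_pos b2] at key
        omega
      · rw [if_pos b1, if_neg b2]
        rw [if_pos b1, if_neg b2] at key
        omega
    · by_cases b2 : (PySem.List.pyGet? q (t : Int)
          == PySem.List.pyGet? q (2 * (i : Int) + 1 - (t : Int))) = true
      · rw [if_neg b1, if_pos b2]
        rw [if_neg b1, if_pos b2] at key
        omega
      · rw [if_neg b1, if_neg b2]
        rw [if_neg b1, if_neg b2] at key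
        omega
  · rw [if_neg hT]
    rw [if_neg (fun h => hT (hTiff.mp h)), if_neg (fun h => hT (hTiff.mp h))] at key
    omega

-- the modified grid M = G.modify y (row.modify x f): its transpose is a one-point update
theorem pv_M_len (G : List (List String)) (y x : Nat) (f : String → String) :
    (G.modify y (fun row => row.modify x f)).length = G.length := by simp

theorem pv_M_headlen (G : List (List String)) (y x : Nat) (f : String → String) :
    ((G.modify y (fun row => row.modify x f)).headD []).length = (G.headD []).length := by
  rw [pv_headD_getD, pv_headD_getD, pv_modify_rowlen]

theorem pv_transposeA_len (G : List (List String)) :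
    (transposeA G).length = (G.headD []).length := by
  rw [pv_transposeA]
  simp

theorem pv_transposeA_M_same (G : List (List String)) (y x : Nat) (f : String → String)
    (hy : y < G.length) (hx : x < (G.getD y []).length) :
    ∀ i : Nat, i < (transposeA G).length → i ≠ x →
    (transposeA (G.modify y (fun row => row.modify x f)))[i]? = (transposeA G)[i]? := by
  intro i hiT hix
  rw [pv_transposeA_len] at hiT
  rw [pv_transposeA, pv_transposeA, pv_M_headlen]
  rw [List.getElem?_map, List.getElem?_map, List.getElem?_range hiT]
  simp only [Option.map_some]
  congr 1
  apply pv_colStr_len_congr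
  · simp
  · intro yy hyy
    rw [pv_cell_modify G y x f yy i hy hx, if_neg (fun h => hix h.2.symm)]

theorem pv_transposeA_M_self (G : List (List String)) (y x : Nat) (f : String → String)
    (hy : y < G.length) (hx : x < (G.getD y []).length) (hxC : x < (G.headD []).length) :
    PySem.List.pyGet? (transposeA (G.modify y (fun row => row.modify x f))) (x : Int)
      = some ((List.range G.length).foldl
          (fun s yy => s ++ (if yy == y then f (pvCell G y x) else pvCell G yy x)) "") := by
  rw [PySem.List.pyGet?_natCast, pv_transposeA, pv_M_headlen,
    List.getElem?_map, List.getElem?_range hxC]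
  simp only [Option.map_some]
  congr 1
  unfold pvColStr
  rw [pv_M_len]
  apply PySem.List.foldl_congr_mem
  intro acc yy hyy
  rw [List.mem_range] at hyy
  rw [pv_cell_modify G y x f yy x hy hx]
  by_cases h : yy = y
  · subst h
    rw [if_pos ⟨rfl, rfl⟩, if_pos (by simp)]
  · rw [if_neg (fun hc => h hc.1.symm), if_neg (by simp [h])]

theorem pv_set_eq_modify {α : Type} (l : List α) (i : Nat) (f : α → α) (v dflt : α)
    (hi : i < l.length) (hv : v = f (l.getD i dflt)) :
    l.set i v = l.modify i f := by
  apply List.ext_getElem (by simp)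
  intro j h1 h2
  rw [List.getElem_set, List.getElem_modify]
  by_cases h : i = j
  · subst h
    rw [if_pos rfl, if_pos rfl, hv, List.getD_eq_getElem?_getD, List.getElem?_eq_getElem hi,
      Option.getD_some]
  · simp [h]

-- modify with a pointwise-equal function
theorem pv_modify_congr {α : Type} (l : List α) (i : Nat) (f g : α → α) (dflt : α)
    (hi : i < l.length) (h : f (l.getD i dflt) = g (l.getD i dflt)) :
    l.modify i f = l.modify i g := by
  apply List.ext_getElem (by simp)
  intro j h1 h2
  rw [List.getElem_modify, List.getElem_modify]
  by_cases hij : i = j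
  · subst hij
    rw [List.getD_eq_getElem?_getD, List.getElem?_eq_getElem hi, Option.getD_some] at h
    simp [h]
  · simp [hij]

-- writing the value a function takes at the cell = modifying by the function (grid level)
theorem pv_modify_cell_const (G : List (List String)) (y x : Nat) (f : String → String)
    (hy : y < G.length) (hx : x < (G.getD y []).length) :
    G.modify y (fun row => row.modify x (fun _ => f ((G.getD y []).getD x "")))
      = G.modify y (fun row => row.modify x f) := by
  apply pv_modify_congr G y _ _ [] hy
  exact pv_modify_congr (G.getD y []) x _ _ "" hx rfl

theorem pv_natcast_beq_zero (n : Nat) : (((n : Int)) == (0 : Int)) = decide (n = 0) := by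
  by_cases h : n = 0 <;> simp [h]

theorem pv_set_row (G : List (List String)) (y x : Nat)
    (hy : y < G.length) (hxrow : x < (G.getD y []).length) (h : String → String) :
    G.set y (PySem.List.slice (G.getD y []) none (some (x : Int))
        ++ [h ((G.getD y []).getD x "")]
        ++ PySem.List.slice (G.getD y []) (some ((x : Int) + 1)) none)
      = G.modify y (fun row => row.modify x h) := by
  apply pv_set_eq_modify G y _ _ [] hy
  rw [pv_newrow _ _ _ hxrow]

-- the columns after a write
theorem pv_Snext (G : List (List String)) (R C y x : Nat) (hy : y < R) (hx : x < C)
    (hGlen : G.length = R) (hhead : (G.headD []).length = C)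
    (hrows : ∀ i : Nat, i < R → C ≤ (G.getD i []).length) (h : String → String) :
    (transposeA G).set x ((List.range R).foldl
        (fun s yy => s ++ (if yy == y then h ((G.getD y []).getD x "")
          else (G.getD yy []).getD x "")) "")
      = transposeA (G.modify y (fun row => row.modify x h)) := by
  have hyG : y < G.length := by omega
  have hxrow : x < (G.getD y []).length := by have := hrows y hy; omega
  have hxC : x < (G.headD []).length := by omega
  have eTG : (transposeA G).length = C := by rw [pv_transposeA_len, hhead]
  have eTM : (transposeA (G.modify y (fun row => row.modify x h))).length = C := by
    rw [pv_transposeA_len, pv_M_headlen, hhead]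
  apply pv_ext_getD _ _ "" (by rw [List.length_set, eTG, eTM])
  intro i hi
  rw [List.length_set, eTG] at hi
  rw [pv_getD_set _ _ _ _ _ (by omega)]
  by_cases hix : x = i
  · subst hix
    rw [if_pos rfl]
    have hval := pv_transposeA_M_self G y x h hyG hxrow hxC
    have hgd := pv_pyGet_getD (transposeA (G.modify y (fun row => row.modify x h))) x ""
      (by omega)
    rw [hval] at hgd
    rw [← Option.some.inj hgd, hGlen]
    simp only [pvCell]
  · rw [if_neg hix]
    have hsame := pv_transposeA_M_same G y x h hyG hxrow i (by omega) (fun hc => hix hc.symm)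
    rw [List.getD_eq_getElem?_getD, List.getD_eq_getElem?_getD, hsame]

-- the updated horizontal counts
theorem pv_mHnext (G : List (List String)) (R C y x : Nat) (hy : y < R) (hx : x < C)
    (hGlen : G.length = R) (hhead : (G.headD []).length = C)
    (hrows : ∀ i : Nat, i < R → C ≤ (G.getD i []).length) (h : String → String) :
    (List.range (R - 1)).map (fun (i : Nat) =>
      if 0 ≤ 2 * (i : Int) + 1 - (y : Int) ∧ 2 * (i : Int) + 1 - (y : Int) < (R : Int) then
        ((List.range (R - 1)).map (fun (i : Nat) =>
            (pvMis G (i : Int) ((i : Int) + 1) : Int))).getD i 0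
          + (if (PySem.List.slice (G.getD y []) none (some (x : Int))
                ++ [h ((G.getD y []).getD x "")]
                ++ PySem.List.slice (G.getD y []) (some ((x : Int) + 1)) none)
              == G.getD (2 * (i : Int) + 1 - (y : Int)).toNat [] then 0 else 1)
          - (if G.getD y [] == G.getD (2 * (i : Int) + 1 - (y : Int)).toNat [] then 0 else 1)
      else ((List.range (R - 1)).map (fun (i : Nat) =>
            (pvMis G (i : Int) ((i : Int) + 1) : Int))).getD i 0)
      = (List.range (R - 1)).map (fun (i : Nat) =>
          (pvMis (G.modify y (fun row => row.modify x h)) (i : Int) ((i : Int) + 1) : Int)) := by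
  have hyG : y < G.length := by omega
  have hxrow : x < (G.getD y []).length := by have := hrows y hy; omega
  apply List.map_eq_map_iff.mpr
  intro i hi
  rw [List.mem_range] at hi
  have key := pv_mis_set G (G.modify y (fun row => row.modify x h)) y
    (by simp) hyG
    (fun i hi hiy => pv_getElem?_modify_ne G y i _ (fun hc => hiy hc.symm))
    i (by omega)
  rw [hGlen] at key
  rw [key, pv_pyGet_modify_self G y _ [] hyG, pv_newrow _ _ _ hxrow,
    pv_pyGet_getD G y [] hyG, pv_getD_map_range _ _ _ _ hi]
  by_cases hTc : 0 ≤ 2 * (i : Int) + 1 - (y : Int) ∧ 2 * (i : Int) + 1 - (y : Int) < (R : Int)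
  · rw [if_pos hTc, if_pos hTc, pv_pyGet_getD' G _ [] hTc.1 (by omega)]
    simp only [pv_some_beq]
    rfl
  · rw [if_neg hTc, if_neg hTc]

-- the updated vertical counts
theorem pv_mVnext (G : List (List String)) (R C y x : Nat) (hy : y < R) (hx : x < C)
    (hGlen : G.length = R) (hhead : (G.headD []).length = C)
    (hrows : ∀ i : Nat, i < R → C ≤ (G.getD i []).length) (h : String → String) :
    (List.range (C - 1)).map (fun (j : Nat) =>
      if 0 ≤ 2 * (j : Int) + 1 - (x : Int) ∧ 2 * (j : Int) + 1 - (x : Int) < (C : Int) then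
        ((List.range (C - 1)).map (fun (j : Nat) =>
            (pvMis (transposeA G) (j : Int) ((j : Int) + 1) : Int))).getD j 0
          + (if ((List.range R).foldl (fun s yy => s ++ (if yy == y then h ((G.getD y []).getD x "")
                else (G.getD yy []).getD x "")) "")
              == (transposeA G).getD (2 * (j : Int) + 1 - (x : Int)).toNat "" then 0 else 1)
          - (if (transposeA G).getD x ""
                == (transposeA G).getD (2 * (j : Int) + 1 - (x : Int)).toNat "" then 0 else 1)
      else ((List.range (C - 1)).map (fun (j : Nat) =>
            (pvMis (transposeA G) (j : Int) ((j : Int) + 1) : Int))).getD j 0)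
      = (List.range (C - 1)).map (fun (j : Nat) =>
          (pvMis (transposeA (G.modify y (fun row => row.modify x h)))
            (j : Int) ((j : Int) + 1) : Int)) := by
  have hyG : y < G.length := by omega
  have hxrow : x < (G.getD y []).length := by have := hrows y hy; omega
  have hxC : x < (G.headD []).length := by omega
  have eTG : (transposeA G).length = C := by rw [pv_transposeA_len, hhead]
  have eTM : (transposeA (G.modify y (fun row => row.modify x h))).length = C := by
    rw [pv_transposeA_len, pv_M_headlen, hhead]
  apply List.map_eq_map_iff.mpr
  intro j hj
  rw [List.mem_range] at hj
  have key := pv_mis_set (transposeA G) (transposeA (G.modify y (fun row => row.modify x h))) x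
    (by rw [eTG, eTM]) (by omega)
    (pv_transposeA_M_same G y x h hyG hxrow)
    j (by omega)
  rw [eTG] at key
  rw [key, pv_transposeA_M_self G y x h hyG hxrow hxC,
    pv_pyGet_getD (transposeA G) x "" (by omega), pv_getD_map_range _ _ _ _ hj, hGlen]
  simp only [pvCell]
  by_cases hTc : 0 ≤ 2 * (j : Int) + 1 - (x : Int) ∧ 2 * (j : Int) + 1 - (x : Int) < (C : Int)
  · rw [if_pos hTc, if_pos hTc, pv_pyGet_getD' (transposeA G) _ "" hTc.1 (by omega)]
    simp only [pv_some_beq]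
    rfl
  · rw [if_neg hTc, if_neg hTc]

-- B's write, on canonical state, produces the canonical state of the modified grid
theorem pv_write (G : List (List String)) (R C y x : Nat) (ch : String) (hy : y < R) (hx : x < C)
    (hGlen : G.length = R) (hhead : (G.headD []).length = C)
    (hrows : ∀ i : Nat, i < R → C ≤ (G.getD i []).length) :
    bwrite R C y x ch G (transposeA G)
        ((List.range (R - 1)).map (fun (i : Nat) => (pvMis G (i : Int) ((i : Int) + 1) : Int)))
        ((List.range (C - 1)).map (fun (j : Nat) =>
          (pvMis (transposeA G) (j : Int) ((j : Int) + 1) : Int)))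
      = (G.modify y (fun row => row.modify x (fun _ => ch)),
         transposeA (G.modify y (fun row => row.modify x (fun _ => ch))),
         (List.range (R - 1)).map (fun (i : Nat) =>
           (pvMis (G.modify y (fun row => row.modify x (fun _ => ch))) (i : Int) ((i : Int) + 1) : Int)),
         (List.range (C - 1)).map (fun (j : Nat) =>
           (pvMis (transposeA (G.modify y (fun row => row.modify x (fun _ => ch))))
             (j : Int) ((j : Int) + 1) : Int))) := by
  have hyG : y < G.length := by omega
  have hxrow : x < (G.getD y []).length := by have := hrows y hy; omega
  have h1 := pv_set_row G y x hyG hxrow (fun _ => ch)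
  have h2 := pv_Snext G R C y x hy hx hGlen hhead hrows (fun _ => ch)
  have h3 := pv_mHnext G R C y x hy hx hGlen hhead hrows (fun _ => ch)
  have h4 := pv_mVnext G R C y x hy hx hGlen hhead hrows (fun _ => ch)
  simp only [] at h1 h2 h3 h4
  simp only [bwrite]
  rw [h1, h2, h3, h4]

-- A's per-cell search on a grid M, in terms of the canonical mismatch counts of M
theorem pv_cell_eq (original : List (String × (Int × Int))) (M : List (List String)) (R C : Nat)
    (hMlen : M.length = R) (hhead : (M.headD []).length = C) :
    (find_reflection_lines M).find? (fun l => !(original.contains l))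
      = (((List.range (C - 1)).findSome? (fun (j : Nat) =>
          if ((((List.range (C - 1)).map (fun (j : Nat) =>
                (pvMis (transposeA M) (j : Int) ((j : Int) + 1) : Int))).getD j 0 == (0 : Int))
              && !(original.contains (("V" : String), ((j : Int), (j : Int) + 1))))
          then some (("V" : String), ((j : Int), (j : Int) + 1)) else none)).orElse (fun _ =>
        (List.range (R - 1)).findSome? (fun (i : Nat) =>
          if ((((List.range (R - 1)).map (fun (i : Nat) =>
                (pvMis M (i : Int) ((i : Int) + 1) : Int))).getD i 0 == (0 : Int))
              && !(original.contains (("H" : String), ((i : Int), (i : Int) + 1))))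
          then some (("H" : String), ((i : Int), (i : Int) + 1)) else none))) := by
  have eT : (transposeA M).length = C := by rw [pv_transposeA_len, hhead]
  rw [pv_frl_eq, pv_find_append]
  have hV : ((pvAxes (transposeA M)).map (fun l => (("V" : String), l))).find?
        (fun l => !(original.contains l))
      = (List.range (C - 1)).findSome? (fun (j : Nat) =>
          if ((((List.range (C - 1)).map (fun (j : Nat) =>
                (pvMis (transposeA M) (j : Int) ((j : Int) + 1) : Int))).getD j 0 == (0 : Int))
              && !(original.contains (("V" : String), ((j : Int), (j : Int) + 1))))
          then some (("V" : String), ((j : Int), (j : Int) + 1)) else none) := by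
    unfold pvAxes
    rw [List.map_map, pv_find_filter_map, eT]
    apply pv_findSome_congr
    intro j hj
    rw [List.mem_range] at hj
    rw [pv_getD_map_range _ _ _ _ hj, pv_natcast_beq_zero]
    rfl
  have hH : ((pvAxes M).map (fun l => (("H" : String), l))).find?
        (fun l => !(original.contains l))
      = (List.range (R - 1)).findSome? (fun (i : Nat) =>
          if ((((List.range (R - 1)).map (fun (i : Nat) =>
                (pvMis M (i : Int) ((i : Int) + 1) : Int))).getD i 0 == (0 : Int))
              && !(original.contains (("H" : String), ((i : Int), (i : Int) + 1))))
          then some (("H" : String), ((i : Int), (i : Int) + 1)) else none) := by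
    unfold pvAxes
    rw [List.map_map, pv_find_filter_map, hMlen]
    apply pv_findSome_congr
    intro i hi
    rw [List.mem_range] at hi
    rw [pv_getD_map_range _ _ _ _ hi, pv_natcast_beq_zero]
    rfl
  rw [hV]
  simp only [hH]

def pvInv (R C : Nat) (G : List (List String)) (S : List String) (mH mV : List Int) : Prop :=
  G.length = R ∧ (G.headD []).length = C ∧ (∀ i : Nat, i < R → C ≤ (G.getD i []).length)
  ∧ S = transposeA G
  ∧ mH = (List.range (R - 1)).map (fun (i : Nat) => (pvMis G (i : Int) ((i : Int) + 1) : Int))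
  ∧ mV = (List.range (C - 1)).map (fun (j : Nat) =>
      (pvMis (transposeA G) (j : Int) ((j : Int) + 1) : Int))


theorem pv_x_loop (original : List (String × (Int × Int))) (R C y : Nat) (hy : y < R) :
    ∀ (xs : List Nat) (G : List (List String)) (S : List String) (mH mV : List Int),
    (∀ x ∈ xs, x < C) → pvInv R C G S mH mV →
    (ax_loop original y xs G).1 = (bx_loop original R C y xs G S mH mV).1
    ∧ ((bx_loop original R C y xs G S mH mV).1 = none →
        (ax_loop original y xs G).2 = (bx_loop original R C y xs G S mH mV).2.1
        ∧ pvInv R C (bx_loop original R C y xs G S mH mV).2.1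
            (bx_loop original R C y xs G S mH mV).2.2.1
            (bx_loop original R C y xs G S mH mV).2.2.2.1
            (bx_loop original R C y xs G S mH mV).2.2.2.2) := by
  intro xs
  induction xs with
  | nil =>
      intro G S mH mV hxs hinv
      exact ⟨rfl, fun _ => ⟨rfl, hinv⟩⟩
  | cons x xs ih =>
      intro G S mH mV hxs hinv
      have hx : x < C := hxs x (by simp)
      obtain ⟨hGlen, hhead, hrows, rfl, rfl, rfl⟩ := hinv
      have hyG : y < G.length := by omega
      have hxrow : x < (G.getD y []).length := by have := hrows y hy; omega
      -- the flipped grid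
      have hch : G.modify y (fun row => row.modify x
            (fun _ => if (G.getD y []).getD x "" == "#" then "." else "#"))
          = G.modify y (fun row => row.modify x (fun c => if c == "#" then "." else "#")) :=
        pv_modify_cell_const G y x (fun c => if c == "#" then "." else "#") hyG hxrow
      simp only [ax_loop, bx_loop]
      rw [pv_write G R C y x _ hy hx hGlen hhead hrows]
      simp only [hch]
      set M := G.modify y (fun row => row.modify x (fun c => if c == "#" then "." else "#"))
        with hM
      have hMlen : M.length = R := by rw [hM, pv_M_len, hGlen]
      have hMhead : (M.headD []).length = C := by rw [hM, pv_M_headlen, hhead]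
      have hMrows : ∀ i : Nat, i < R → C ≤ (M.getD i []).length := by
        intro i hi
        rw [hM, pv_modify_rowlen]
        exact hrows i hi
      rw [pv_cell_eq original M R C hMlen hMhead]
      split
      · exact ⟨rfl, by simp_all⟩
      · -- flip back: B's second write on M
        have hyM : y < M.length := by omega
        have hxM : x < (M.getD y []).length := by have := hMrows y hy; omega
        rw [pv_write M R C y x _ hy hx hMlen hMhead hMrows]
        have hch2 : M.modify y (fun row => row.modify x
              (fun _ => if (M.getD y []).getD x "" == "#" then "." else "#"))
            = M.modify y (fun row => row.modify x (fun c => if c == "#" then "." else "#")) :=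
          pv_modify_cell_const M y x (fun c => if c == "#" then "." else "#") hyM hxM
        simp only [hch2]
        apply ih
        · intro x' hx'
          exact hxs x' (by simp [hx'])
        · refine ⟨by rw [pv_M_len, hMlen], ?_, ?_, rfl, rfl, rfl⟩
          · rw [pv_M_headlen, hMhead]
          · intro i hi
            rw [pv_modify_rowlen]
            exact hMrows i hi

theorem pv_y_loop (original : List (String × (Int × Int))) (R C : Nat) :
    ∀ (ys : List Nat) (G : List (List String)) (S : List String) (mH mV : List Int),
    (∀ y ∈ ys, y < R) → pvInv R C G S mH mV →
    ay_loop original ys G = by_loop original R C ys G S mH mV := by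
  intro ys
  induction ys with
  | nil => intro G S mH mV _ _; rfl
  | cons y ys ih =>
      intro G S mH mV hys hinv
      have hy : y < R := hys y (by simp)
      simp only [ay_loop, by_loop]
      rw [hinv.2.1]
      have hx := pv_x_loop original R C y hy (List.range C) G S mH mV
        (fun x hx => List.mem_range.mp hx) hinv
      rcases hax : ax_loop original y (List.range C) G with ⟨oA, GA⟩
      rcases hbx : bx_loop original R C y (List.range C) G S mH mV with ⟨oB, GB, SB, mHB, mVB⟩
      rw [hax, hbx] at hx
      cases oB with
      | some l =>
          have h1 : oA = some l := by simpa using hx.1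
          rw [h1]
      | none =>
          have h1 : oA = none := by simpa using hx.1
          have h2 := hx.2 rfl
          rw [h1]
          simp only at h2
          rw [h2.1]
          exact ih GB SB mHB mVB (fun y' hy' => hys y' (by simp [hy'])) h2.2

-- ===== VERDICT (by name: the statement is the Claim_ definition above) =====
theorem check_smudges_spec : Claim_equal_check_smudges := by
  unfold Claim_equal_check_smudges
  intro p original _ hpre
  unfold Spec_check_smudges
  simp only [check_smudges, check_smudges_alt]
  have hid : p.map (fun r => r) = p := by simp
  rw [hid]
  have hcols : (List.range ((p.headD []).length)).map (fun (x : Nat) =>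
      (List.range p.length).foldl (fun s y => s ++ (p.getD y []).getD x "") "")
      = transposeA p := by
    rw [pv_transposeA]
    apply List.map_eq_map_iff.mpr
    intro x _
    rfl
  have hmH : (List.range (p.length - 1)).map (fun (i : Nat) =>
      bmis p (i : Int) ((i : Int) + 1) 0)
      = (List.range (p.length - 1)).map (fun (i : Nat) =>
          (pvMis p (i : Int) ((i : Int) + 1) : Int)) := by
    apply List.map_eq_map_iff.mpr
    intro i _
    rw [pv_bmis_eq]
    simp
  have hmV : (List.range ((p.headD []).length - 1)).map (fun (j : Nat) =>
      bmis (transposeA p) (j : Int) ((j : Int) + 1) 0)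
      = (List.range ((p.headD []).length - 1)).map (fun (j : Nat) =>
          (pvMis (transposeA p) (j : Int) ((j : Int) + 1) : Int)) := by
    apply List.map_eq_map_iff.mpr
    intro j _
    rw [pv_bmis_eq]
    simp
  rw [hcols, hmH, hmV]
  apply pv_y_loop original p.length ((p.headD []).length) (List.range p.length) p
    (transposeA p) _ _ (fun y hy => List.mem_range.mp hy)
  refine ⟨rfl, rfl, ?_, rfl, rfl, rfl⟩
  intro i hi
  have hmem : p.getD i [] ∈ p := by
    rw [List.getD_eq_getElem?_getD, List.getElem?_eq_getElem hi, Option.getD_some]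
    exact List.getElem_mem hi
  exact hpre _ hmem
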